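-- pv_equiv track=rewrite | github.com/paulross24/pumpkin-v3 | pumpkin/act.py | _looks_like_unified_diff
-- ===== SOURCE A (Python) =====
-- def _looks_like_unified_diff(patch_text: str) -> bool:
--     has_old = False
--     has_new = False
--     for line in patch_text.splitlines():
--         if line.startswith("--- "):
--             has_old = True
--         if line.startswith("+++ "):
--             has_new = True
--         if has_old and has_new:
--             return True
--     return False
-- ===== SOURCE B (Python) =====
-- def _looks_like_unified_diff(patch_text: str) -> bool:
--     lines = patch_text.splitlines()
--     return any(l.startswith("--- ") for l in lines) and \
--            any(l.startswith("+++ ") for l in lines)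
-- ===== Notes on version B (the rewrite author's own statement) =====
-- stated objective: simpler
-- what changed: Replaces the single stateful loop accumulating two flags with early return by two independent any() existence checks combined with short-circuit and.
import Mathlib
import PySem

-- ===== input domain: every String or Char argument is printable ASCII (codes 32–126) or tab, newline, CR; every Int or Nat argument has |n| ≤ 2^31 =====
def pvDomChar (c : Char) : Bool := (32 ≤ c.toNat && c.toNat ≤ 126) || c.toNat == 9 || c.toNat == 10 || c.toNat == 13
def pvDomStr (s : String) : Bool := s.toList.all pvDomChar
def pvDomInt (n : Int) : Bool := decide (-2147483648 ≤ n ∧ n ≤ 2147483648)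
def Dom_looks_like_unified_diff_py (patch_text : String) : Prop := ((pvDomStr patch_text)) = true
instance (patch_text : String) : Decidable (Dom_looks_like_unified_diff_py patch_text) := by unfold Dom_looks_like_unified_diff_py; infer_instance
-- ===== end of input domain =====

-- B replaces A's single stateful two-flag loop with two independent existence checks; objective: simpler.

-- ===== PORT A =====
-- A's for-loop with the two flags and the early 'return True'
def looksLoopA : List String → Bool → Bool → Bool
  | [], _, _ => false
  | line :: rest, has_old, has_new =>
    let has_old' := if PySem.Str.startswith line "--- " then true else has_old
    let has_new' := if PySem.Str.startswith line "+++ " then true else has_new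
    if has_old' && has_new' then true else looksLoopA rest has_old' has_new'

def looks_like_unified_diff_py (patch_text : String) : Bool :=
  looksLoopA (PySem.Str.splitlines patch_text) false false

-- ===== PORT B =====
def looks_like_unified_diff_py_alt (patch_text : String) : Bool :=
  let lines := PySem.Str.splitlines patch_text
  (lines.any (fun l => PySem.Str.startswith l "--- ")) &&
  (lines.any (fun l => PySem.Str.startswith l "+++ "))

-- ===== PRECONDITION & SPEC =====
def Spec_looks_like_unified_diff_py (patch_text : String) (out : Bool) : Prop := out = looks_like_unified_diff_py_alt patch_text
instance (patch_text : String) (out : Bool) : Decidable (Spec_looks_like_unified_diff_py patch_text out) := by unfold Spec_looks_like_unified_diff_py; infer_instance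

-- ===== CLAIM (what is proved, stated in full; the proofs are below) =====
def Claim_equal_looks_like_unified_diff_py : Prop := ∀ (patch_text : String), Dom_looks_like_unified_diff_py patch_text → Spec_looks_like_unified_diff_py patch_text (looks_like_unified_diff_py patch_text)

-- ===== LEMMAS AND PROOFS =====
-- loop invariant: A's loop computes "(has_old ∨ a marker ahead) ∧ (has_new ∨ a marker ahead)"
theorem looksLoopA_eq (ls : List String) (ho hn : Bool) (h : (ho && hn) = false) :
    looksLoopA ls ho hn =
      ((ho || ls.any (fun l => PySem.Str.startswith l "--- ")) &&
       (hn || ls.any (fun l => PySem.Str.startswith l "+++ "))) := by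
  induction ls generalizing ho hn with
  | nil => cases ho <;> cases hn <;> simp_all [looksLoopA]
  | cons l rest ih =>
    simp only [looksLoopA, List.any_cons]
    cases h1 : PySem.Str.startswith l "--- " <;>
      cases h2 : PySem.Str.startswith l "+++ " <;>
      cases ho <;> cases hn <;> simp_all

-- ===== VERDICT (by name: the statement is the Claim_ definition above) =====
theorem looks_like_unified_diff_py_spec : Claim_equal_looks_like_unified_diff_py := by
  intro patch_text _
  unfold Spec_looks_like_unified_diff_py looks_like_unified_diff_py looks_like_unified_diff_py_alt
  rw [looksLoopA_eq _ _ _ rfl]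
  simp
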